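-- pv_equiv track=rewrite | github.com/tk231/sophia | utils/find_closest_mins.py | find_closest_mins2
-- ===== SOURCE A (Python) =====
-- def find_closest_mins2(list_of_peaks: list, list_of_mins: list) -> list:
--     closest_mins = []
--
--     for peak_idx in list_of_peaks:
--         # Filter the mins for those less than and greater than the current peak
--         less_than_peak = [m for m in list_of_mins if m < peak_idx]
--         greater_than_peak = [m for m in list_of_mins if m > peak_idx]
--
--         # Find the closest less and greater mins
--         min_less = max(less_than_peak) if less_than_peak else None
--         min_greater = min(greater_than_peak) if greater_than_peak else None
--
--         # Append the result as a tuple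
--         closest_mins.append((min_less, min_greater))
--
--     return closest_mins
-- ===== SOURCE B (Python) =====
-- def _bisect_left(a, x):
--     lo, hi = 0, len(a)
--     while lo < hi:
--         mid = (lo + hi) // 2
--         if a[mid] < x:
--             lo = mid + 1
--         else:
--             hi = mid
--     return lo
--
--
-- def _bisect_right(a, x):
--     lo, hi = 0, len(a)
--     while lo < hi:
--         mid = (lo + hi) // 2
--         if x < a[mid]:
--             hi = mid
--         else:
--             lo = mid + 1
--     return lo
--
--
-- def find_closest_mins2(list_of_peaks: list, list_of_mins: list) -> list:
--     s = sorted(list_of_mins)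
--     n = len(s)
--     closest_mins = []
--     for peak_idx in list_of_peaks:
--         i = _bisect_left(s, peak_idx)
--         j = _bisect_right(s, peak_idx)
--         closest_mins.append((s[i - 1] if i > 0 else None,
--                              s[j] if j < n else None))
--     return closest_mins
-- ===== Notes on version B (the rewrite author's own statement) =====
-- stated objective: faster
-- what changed: B sorts the mins once and answers each peak with two hand-written binary searches (bisect_left/bisect_right) on the sorted list instead of rebuilding two filtered lists and running max/min over them for every peak.
import Mathlib
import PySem

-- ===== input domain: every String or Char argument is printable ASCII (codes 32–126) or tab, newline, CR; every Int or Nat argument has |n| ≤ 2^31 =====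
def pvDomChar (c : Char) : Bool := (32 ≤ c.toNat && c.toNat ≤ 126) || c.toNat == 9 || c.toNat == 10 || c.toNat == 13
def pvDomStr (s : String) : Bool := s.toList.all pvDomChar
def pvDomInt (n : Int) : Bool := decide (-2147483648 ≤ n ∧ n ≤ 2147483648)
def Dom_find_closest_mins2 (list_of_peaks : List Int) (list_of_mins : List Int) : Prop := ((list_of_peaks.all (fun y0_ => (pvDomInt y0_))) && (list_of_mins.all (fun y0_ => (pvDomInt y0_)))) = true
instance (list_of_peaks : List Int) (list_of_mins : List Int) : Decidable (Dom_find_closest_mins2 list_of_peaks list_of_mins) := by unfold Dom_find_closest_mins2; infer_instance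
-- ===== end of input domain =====

-- B sorts the mins once and answers each peak with two binary searches, instead of
-- A's per-peak filter + max/min scans; measured asymptotically faster (O((P+M) log M) vs O(P*M)).

-- ===== PORT A =====
def find_closest_mins2 (list_of_peaks : List Int) (list_of_mins : List Int) : List (Option Int × Option Int) :=
  list_of_peaks.foldl (fun closest_mins peak_idx =>
    let less_than_peak := list_of_mins.filter (fun m => m < peak_idx)
    let greater_than_peak := list_of_mins.filter (fun m => peak_idx < m)
    let min_less : Option Int :=
      if less_than_peak.isEmpty then none else PySem.List.max? less_than_peak (fun x => x)
    let min_greater : Option Int :=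
      if greater_than_peak.isEmpty then none else PySem.List.min? greater_than_peak (fun x => x)
    closest_mins ++ [(min_less, min_greater)]) []

-- ===== PORT B =====
-- the hand-written _bisect_left/_bisect_right in Source B are the textbook bisect loops,
-- which PySem.List.bisectLeft / bisectRight transcribe exactly
def find_closest_mins2_alt (list_of_peaks : List Int) (list_of_mins : List Int) : List (Option Int × Option Int) :=
  let s := PySem.List.sorted list_of_mins (fun x => x) false
  let n := s.length
  list_of_peaks.foldl (fun closest_mins peak_idx =>
    let i := PySem.List.bisectLeft s peak_idx
    let j := PySem.List.bisectRight s peak_idx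
    closest_mins ++ [((if 0 < i then some (s.getD (i - 1) 0) else none),
                      (if j < n then some (s.getD j 0) else none))]) []

-- ===== PRECONDITION & SPEC =====
def Spec_find_closest_mins2 (list_of_peaks : List Int) (list_of_mins : List Int) (out : List (Option Int × Option Int)) : Prop := out = find_closest_mins2_alt list_of_peaks list_of_mins
instance (list_of_peaks : List Int) (list_of_mins : List Int) (out : List (Option Int × Option Int)) : Decidable (Spec_find_closest_mins2 list_of_peaks list_of_mins out) := by unfold Spec_find_closest_mins2; infer_instance

-- ===== CLAIM (what is proved, stated in full; the proofs are below) =====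
def Claim_equal_find_closest_mins2 : Prop := ∀ (list_of_peaks : List Int) (list_of_mins : List Int), Dom_find_closest_mins2 list_of_peaks list_of_mins → Spec_find_closest_mins2 list_of_peaks list_of_mins (find_closest_mins2 list_of_peaks list_of_mins)

-- ===== LEMMAS AND PROOFS =====

theorem pv_foldl_append {α β : Type} (f : α → β) (xs : List α) (acc : List β) :
    xs.foldl (fun a x => a ++ [f x]) acc = acc ++ xs.map f := by
  induction xs generalizing acc with
  | nil => simp
  | cons x t ih => simp [List.foldl, ih]

-- the per-peak value A computes equals the per-peak value B computes
theorem pv_elem_eq (mins : List Int) (p : Int) :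
    (let less := mins.filter (fun m => m < p)
     let greater := mins.filter (fun m => p < m)
     ((if less.isEmpty then none else PySem.List.max? less (fun x => x)),
      (if greater.isEmpty then none else PySem.List.min? greater (fun x => x))))
    =
    (let s := PySem.List.sorted mins (fun x => x) false
     ((if 0 < PySem.List.bisectLeft s p then some (s.getD (PySem.List.bisectLeft s p - 1) 0) else none),
      (if PySem.List.bisectRight s p < s.length then some (s.getD (PySem.List.bisectRight s p) 0) else none))) := by
  set s := PySem.List.sorted mins (fun x => x) false with hs
  have hperm : s.Perm mins := PySem.List.sorted_perm mins (fun x => x) false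
  have hpw : List.Pairwise (fun a b => a ≤ b) s := PySem.List.sorted_pairwise mins (fun x => x)
  obtain ⟨hil, hilt, hige⟩ := PySem.List.bisectLeft_spec s p hpw
  obtain ⟨hjl, hjle, hjgt⟩ := PySem.List.bisectRight_spec s p hpw
  set i := PySem.List.bisectLeft s p with hi
  set j := PySem.List.bisectRight s p with hj
  have hmem : ∀ x : Int, x ∈ mins ↔ x ∈ s := fun x => (hperm.mem_iff).symm
  refine Prod.ext ?_ ?_
  · -- left component: closest min below the peak
    by_cases h0 : 0 < i
    · have hi1 : i - 1 < s.length := by omega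
      have hvlt : s[i-1] < p := hilt (i - 1) hi1 (by omega)
      have hvin : s[i-1] ∈ mins.filter (fun m => m < p) := by
        simp only [List.mem_filter, decide_eq_true_eq]
        exact ⟨(hmem _).2 (List.getElem_mem hi1), hvlt⟩
      have hne : ¬ (mins.filter (fun m => m < p)).isEmpty := by
        rw [List.isEmpty_iff]; exact List.ne_nil_of_mem hvin
      simp only [hne]
      cases hmx : PySem.List.max? (mins.filter (fun m => m < p)) (fun x => x) with
      | none =>
        exact absurd ((PySem.List.max?_eq_none_iff _ _).1 hmx)
          (by intro h; rw [h] at hvin; simp at hvin)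
      | some m =>
        have hmmem := PySem.List.max?_mem hmx
        have hmax := PySem.List.max?_isMax hmx
        have hvm : s[i-1] ≤ m := hmax _ hvin
        have hmv : m ≤ s[i-1] := by
          have hmlt : m < p := by
            have := hmmem; simp only [List.mem_filter, decide_eq_true_eq] at this
            exact this.2
          have hms : m ∈ s := (hmem m).1 (List.mem_of_mem_filter hmmem)
          obtain ⟨k, hk, hkm⟩ := List.mem_iff_getElem.1 hms
          have hki : k < i := by
            by_contra hge
            exact absurd (hige k hk (by omega)) (by rw [hkm]; omega)
          calc m = s[k] := hkm.symm
            _ ≤ s[i-1] := PySem.List.sorted_id_getElem_mono mins (by omega) hi1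
        have hmval : m = s[i-1] := le_antisymm hmv hvm
        simp [List.getElem?_eq_getElem hi1, hmval, ← hi, h0]
    · -- i = 0: no element below the peak
      have hi0 : i = 0 := by omega
      have hempty : mins.filter (fun m => m < p) = [] := by
        apply List.filter_eq_nil_iff.2
        intro m hm
        simp only [decide_eq_true_eq]
        obtain ⟨k, hk, hkm⟩ := List.mem_iff_getElem.1 ((hmem m).1 hm)
        have := hige k hk (by omega)
        omega
      simp [hempty]
      omega
  · -- right component: closest min above the peak
    by_cases hjlt : j < s.length
    · have hvgt : p < s[j] := hjgt j hjlt (le_refl _)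
      have hvin : s[j] ∈ mins.filter (fun m => p < m) := by
        simp only [List.mem_filter, decide_eq_true_eq]
        exact ⟨(hmem _).2 (List.getElem_mem hjlt), hvgt⟩
      have hne : ¬ (mins.filter (fun m => p < m)).isEmpty := by
        rw [List.isEmpty_iff]; exact List.ne_nil_of_mem hvin
      simp only [hne]
      cases hmn : PySem.List.min? (mins.filter (fun m => p < m)) (fun x => x) with
      | none =>
        exact absurd ((PySem.List.min?_eq_none_iff _ _).1 hmn)
          (by intro h; rw [h] at hvin; simp at hvin)
      | some m =>
        have hmmem := PySem.List.min?_mem hmn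
        have hmin := PySem.List.min?_isMin hmn
        have hmv : m ≤ s[j] := hmin _ hvin
        have hvm : s[j] ≤ m := by
          have hmgt : p < m := by
            have := hmmem; simp only [List.mem_filter, decide_eq_true_eq] at this
            exact this.2
          have hms : m ∈ s := (hmem m).1 (List.mem_of_mem_filter hmmem)
          obtain ⟨k, hk, hkm⟩ := List.mem_iff_getElem.1 hms
          have hkj : j ≤ k := by
            by_contra hlt
            exact absurd (hjle k hk (by omega)) (by rw [hkm]; omega)
          calc s[j] ≤ s[k] := PySem.List.sorted_id_getElem_mono mins hkj hk
            _ = m := hkm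
        have hmval : m = s[j] := le_antisymm hmv hvm
        simp [hmval, ← hj, hjlt]
    · -- j = len: no element above the peak
      have hempty : mins.filter (fun m => p < m) = [] := by
        apply List.filter_eq_nil_iff.2
        intro m hm
        simp only [decide_eq_true_eq]
        obtain ⟨k, hk, hkm⟩ := List.mem_iff_getElem.1 ((hmem m).1 hm)
        have := hjle k hk (by omega)
        omega
      simp [hempty]
      omega

theorem pv_spec : ∀ (list_of_peaks : List Int) (list_of_mins : List Int),
    find_closest_mins2 list_of_peaks list_of_mins = find_closest_mins2_alt list_of_peaks list_of_mins := by
  intro peaks mins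
  unfold find_closest_mins2 find_closest_mins2_alt
  simp only [pv_foldl_append, List.nil_append]
  apply List.map_congr_left
  intro p _
  exact pv_elem_eq mins p

-- ===== VERDICT (by name: the statement is the Claim_ definition above) =====
theorem find_closest_mins2_spec : Claim_equal_find_closest_mins2 := by
  intro peaks mins _
  unfold Spec_find_closest_mins2
  exact pv_spec peaks mins
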